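-- pv_equiv track=rewrite | github.com/tblaha/top-panel-redesign | combinations.py | stringersamount
-- ===== SOURCE A (Python) =====
-- from collections import OrderedDict
--
-- def stringersamount(NS):
--     comb = []
--     lst = [0,1,2,3,4,5] # List of data which combinations are to be calculated for
--     count = NS
--
--     if NS == 4:
--         for j in range (6):
--             for i in range (6):
--                 for k in range (6):
--                     for s in range (6):
--                         opt = [lst[j],lst[i],lst[k],lst[s]]
--                         comb.append(opt)
--     elif NS ==3:
--         for j in range (6):
--             for i in range (6):
--                 for k in range (6):
--                     opt = [lst[j],lst[i],lst[k]]
--                     comb.append(opt)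
--
--     elif NS == 2:
--         for j in range (6):
--             for i in range(6):
--                 opt = [lst[j],lst[i]]
--                 comb.append(opt)
--
--     comb1 = map(list, OrderedDict.fromkeys(map(tuple,comb)))
--     return comb1
-- ===== SOURCE B (Python) =====
-- def stringersamount(NS):
--     # Incremental cartesian-product build (last coordinate varies fastest,
--     # matching A's nested-loop order); no dedup needed since tuples are distinct.
--     if NS not in (2, 3, 4):
--         return map(list, [])
--     result = [[]]
--     for _ in range(NS):
--         result = [p + [d] for p in result for d in range(6)]
--     return map(list, result)
-- ===== Notes on version B (the rewrite author's own statement) =====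
-- stated objective: simpler
-- what changed: Replaces the three hard-coded nested-loop blocks plus OrderedDict dedup with a single incremental cartesian-product loop over NS levels (the products are already distinct, so the dedup is dropped).
import Mathlib
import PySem

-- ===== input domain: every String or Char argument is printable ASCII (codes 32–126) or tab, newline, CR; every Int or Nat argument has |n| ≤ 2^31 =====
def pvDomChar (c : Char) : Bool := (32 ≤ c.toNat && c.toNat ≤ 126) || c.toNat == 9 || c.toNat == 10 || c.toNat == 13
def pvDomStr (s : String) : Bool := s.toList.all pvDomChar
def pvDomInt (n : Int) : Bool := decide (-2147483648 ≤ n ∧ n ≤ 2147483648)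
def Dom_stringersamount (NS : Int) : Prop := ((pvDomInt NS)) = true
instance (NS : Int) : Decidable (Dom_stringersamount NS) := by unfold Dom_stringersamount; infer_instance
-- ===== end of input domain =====

-- B replaces the three hard-coded nested-loop blocks and the OrderedDict dedup by one
-- incremental cartesian-product loop (simpler; same values, same order).
-- ===== PORT A =====
-- list indices lst[j] etc.: j is always in range(6) and lst has length 6, so the .getD 0
-- default of the IndexError-primitive pyGet? is never taken
def stringersamount (NS : Int) : List (List Int) :=
  let lst : List Int := [0, 1, 2, 3, 4, 5]
  let comb : List (List Int) :=
    if NS = 4 then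
      (PySem.List.pyRange 0 6 1).foldl (fun c j =>
        (PySem.List.pyRange 0 6 1).foldl (fun c i =>
          (PySem.List.pyRange 0 6 1).foldl (fun c k =>
            (PySem.List.pyRange 0 6 1).foldl (fun c s =>
              c ++ [[(PySem.List.pyGet? lst j).getD 0, (PySem.List.pyGet? lst i).getD 0,
                     (PySem.List.pyGet? lst k).getD 0, (PySem.List.pyGet? lst s).getD 0]]) c) c) c) []
    else if NS = 3 then
      (PySem.List.pyRange 0 6 1).foldl (fun c j =>
        (PySem.List.pyRange 0 6 1).foldl (fun c i =>
          (PySem.List.pyRange 0 6 1).foldl (fun c k =>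
            c ++ [[(PySem.List.pyGet? lst j).getD 0, (PySem.List.pyGet? lst i).getD 0,
                   (PySem.List.pyGet? lst k).getD 0]]) c) c) []
    else if NS = 2 then
      (PySem.List.pyRange 0 6 1).foldl (fun c j =>
        (PySem.List.pyRange 0 6 1).foldl (fun c i =>
          c ++ [[(PySem.List.pyGet? lst j).getD 0, (PySem.List.pyGet? lst i).getD 0]]) c) []
    else []
  PySem.List.dedup comb

-- ===== PORT B =====
def stringersamount_alt (NS : Int) : List (List Int) :=
  if NS = 2 ∨ NS = 3 ∨ NS = 4 then
    (List.range NS.toNat).foldl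
      (fun res _ => res.flatMap (fun p => (PySem.List.pyRange 0 6 1).map (fun d => p ++ [d])))
      [[]]
  else []

-- ===== PRECONDITION & SPEC =====
def Spec_stringersamount (NS : Int) (out : List (List Int)) : Prop := out = stringersamount_alt NS
instance (NS : Int) (out : List (List Int)) : Decidable (Spec_stringersamount NS out) := by unfold Spec_stringersamount; infer_instance

-- ===== CLAIM (what is proved, stated in full; the proofs are below) =====
def Claim_equal_stringersamount : Prop := ∀ (NS : Int), Dom_stringersamount NS → Spec_stringersamount NS (stringersamount NS)

-- ===== LEMMAS AND PROOFS =====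

-- one level of B's incremental product
def step6 (X : List (List Int)) : List (List Int) :=
  X.flatMap (fun p => (PySem.List.pyRange 0 6 1).map (fun d => p ++ [d]))

theorem flatMap_congr' {α β : Type} {l : List α} {f h : α → List β}
    (H : ∀ a ∈ l, f a = h a) : l.flatMap f = l.flatMap h := by
  induction l with
  | nil => rfl
  | cons a l ih =>
    simp only [List.flatMap_cons]
    rw [H a (by simp), ih (fun x hx => H x (by simp [hx]))]

-- indexing the identity list [0..5] is the identity on range(6)
theorem g_id : ∀ j ∈ PySem.List.pyRange 0 6 1,
    ((PySem.List.pyGet? [0, 1, 2, 3, 4, 5] j).getD 0 : Int) = j := by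
  intro j hj
  rw [PySem.List.mem_pyRange_one] at hj
  obtain ⟨h1, h2⟩ := hj
  interval_cases j <;> rfl

theorem set_foldl_add {α : Type} [BEq α] [LawfulBEq α] (l : List α) :
    ∀ acc : List α, (acc ++ l).Nodup → l.foldl PySem.Set.add acc = acc ++ l := by
  induction l with
  | nil => intro acc _; simp
  | cons x xs ih =>
    intro acc h
    have hx : x ∉ acc := by
      intro hmem
      have := List.disjoint_of_nodup_append h hmem
      simp at this
    have hadd : PySem.Set.add acc x = acc ++ [x] := by
      simp [PySem.Set.add, PySem.Set.contains, hx]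
    rw [List.foldl_cons, hadd, ih (acc ++ [x]) (by simpa using h)]
    simp

theorem dedup_eq_self {α : Type} [BEq α] [LawfulBEq α] (l : List α) (h : l.Nodup) :
    PySem.List.dedup l = l := by
  rw [PySem.List.dedup_eq_ofList, PySem.Set.ofList_eq_foldl]
  simpa using set_foldl_add l [] (by simpa using h)

theorem len_step6 (X : List (List Int)) (n : Nat) (h : ∀ p ∈ X, p.length = n) :
    ∀ q ∈ step6 X, q.length = n + 1 := by
  intro q hq
  obtain ⟨p, hp, hmem⟩ := List.mem_flatMap.mp hq
  obtain ⟨d, _, rfl⟩ := List.mem_map.mp hmem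
  simp [h p hp]

theorem nodup_step6 (X : List (List Int)) (n : Nat) (hlen : ∀ p ∈ X, p.length = n)
    (hX : X.Nodup) : (step6 X).Nodup := by
  induction X with
  | nil => exact List.nodup_nil
  | cons x xs ih =>
    rw [show step6 (x :: xs)
        = ((PySem.List.pyRange 0 6 1).map (fun d => x ++ [d])) ++ step6 xs from rfl]
    rw [List.nodup_append]
    refine ⟨?_, ?_, ?_⟩
    · apply List.Nodup.map_on ?_ (PySem.List.nodup_pyRange_one 0 6)
      intro a _ b _ hab
      have := (List.append_inj hab rfl).2
      simpa using this
    · exact ih (fun p hp => hlen p (List.mem_cons_of_mem _ hp)) (List.Nodup.of_cons hX)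
    · intro q hq1 r hq2 hqr
      obtain ⟨d, _, hqd⟩ := List.mem_map.mp hq1
      obtain ⟨p, hp, hmem⟩ := List.mem_flatMap.mp hq2
      obtain ⟨e, _, heq⟩ := List.mem_map.mp hmem
      have hpr : p ++ [e] = q := by simpa using heq.trans hqr.symm
      have heq2 : p ++ [e] = x ++ [d] := by simpa using hpr.trans hqd.symm
      have hlp : p.length = x.length := by
        rw [hlen p (List.mem_cons_of_mem _ hp), hlen x (List.mem_cons_self)]
      have hpx : p = x := (List.append_inj heq2 hlp).1
      have hxs : x ∉ xs := (List.nodup_cons.mp hX).1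
      exact hxs (hpx ▸ hp)

theorem nodup2 : (step6 (step6 [[]])).Nodup := by
  have h0len : ∀ p ∈ ([[]] : List (List Int)), p.length = 0 := by simp
  have h1len := len_step6 [[]] 0 h0len
  exact nodup_step6 _ 1 h1len (nodup_step6 _ 0 h0len (by simp))

theorem nodup3 : (step6 (step6 (step6 [[]]))).Nodup := by
  have h0len : ∀ p ∈ ([[]] : List (List Int)), p.length = 0 := by simp
  have h1len := len_step6 [[]] 0 h0len
  have h2len := len_step6 _ 1 h1len
  exact nodup_step6 _ 2 h2len (nodup_step6 _ 1 h1len (nodup_step6 _ 0 h0len (by simp)))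

theorem nodup4 : (step6 (step6 (step6 (step6 [[]])))).Nodup := by
  have h0len : ∀ p ∈ ([[]] : List (List Int)), p.length = 0 := by simp
  have h1len := len_step6 [[]] 0 h0len
  have h2len := len_step6 _ 1 h1len
  have h3len := len_step6 _ 2 h2len
  exact nodup_step6 _ 3 h3len
    (nodup_step6 _ 2 h2len (nodup_step6 _ 1 h1len (nodup_step6 _ 0 h0len (by simp))))

theorem case2 : stringersamount 2 = stringersamount_alt 2 := by
  have halt : stringersamount_alt 2 = step6 (step6 [[]]) := rfl
  have hB : step6 (step6 [[]]) = (PySem.List.pyRange 0 6 1).flatMap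
      (fun j => (PySem.List.pyRange 0 6 1).map (fun i => [j, i])) := by
    simp [step6, List.flatMap_map]
  rw [halt]
  simp only [stringersamount]
  rw [if_neg (by norm_num : ¬((2:Int) = 4)), if_neg (by norm_num : ¬((2:Int) = 3)),
    if_pos trivial]
  simp only [PySem.List.foldl_append_singleton_eq_map, PySem.List.foldl_append_eq_flatMap,
    List.nil_append]
  rw [show ((PySem.List.pyRange 0 6 1).flatMap fun j => (PySem.List.pyRange 0 6 1).map fun i =>
        [(PySem.List.pyGet? [0,1,2,3,4,5] j).getD 0, (PySem.List.pyGet? [0,1,2,3,4,5] i).getD 0])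
      = step6 (step6 [[]]) from ?_]
  · exact dedup_eq_self _ nodup2
  · rw [hB]
    apply flatMap_congr'
    intro j hj
    rw [g_id j hj]
    exact List.map_congr_left (fun i hi => by rw [g_id i hi])

theorem case3 : stringersamount 3 = stringersamount_alt 3 := by
  have halt : stringersamount_alt 3 = step6 (step6 (step6 [[]])) := rfl
  have hB : step6 (step6 (step6 [[]])) = (PySem.List.pyRange 0 6 1).flatMap
      (fun j => (PySem.List.pyRange 0 6 1).flatMap
        (fun i => (PySem.List.pyRange 0 6 1).map (fun k => [j, i, k]))) := by
    simp [step6, List.flatMap_map, List.flatMap_assoc]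
  rw [halt]
  simp only [stringersamount]
  rw [if_neg (by norm_num : ¬((3:Int) = 4)), if_pos trivial]
  simp only [PySem.List.foldl_append_singleton_eq_map, PySem.List.foldl_append_eq_flatMap,
    List.nil_append]
  rw [show ((PySem.List.pyRange 0 6 1).flatMap fun j => (PySem.List.pyRange 0 6 1).flatMap fun i =>
        (PySem.List.pyRange 0 6 1).map fun k =>
        [(PySem.List.pyGet? [0,1,2,3,4,5] j).getD 0, (PySem.List.pyGet? [0,1,2,3,4,5] i).getD 0,
         (PySem.List.pyGet? [0,1,2,3,4,5] k).getD 0])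
      = step6 (step6 (step6 [[]])) from ?_]
  · exact dedup_eq_self _ nodup3
  · rw [hB]
    apply flatMap_congr'
    intro j hj
    rw [g_id j hj]
    apply flatMap_congr'
    intro i hi
    rw [g_id i hi]
    exact List.map_congr_left (fun k hk => by rw [g_id k hk])

theorem case4 : stringersamount 4 = stringersamount_alt 4 := by
  have halt : stringersamount_alt 4 = step6 (step6 (step6 (step6 [[]]))) := rfl
  have hB : step6 (step6 (step6 (step6 [[]]))) = (PySem.List.pyRange 0 6 1).flatMap
      (fun j => (PySem.List.pyRange 0 6 1).flatMap
        (fun i => (PySem.List.pyRange 0 6 1).flatMap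
          (fun k => (PySem.List.pyRange 0 6 1).map (fun s => [j, i, k, s])))) := by
    simp [step6, List.flatMap_map, List.flatMap_assoc]
  rw [halt]
  simp only [stringersamount]
  rw [if_pos trivial]
  simp only [PySem.List.foldl_append_singleton_eq_map, PySem.List.foldl_append_eq_flatMap,
    List.nil_append]
  rw [show ((PySem.List.pyRange 0 6 1).flatMap fun j => (PySem.List.pyRange 0 6 1).flatMap fun i =>
        (PySem.List.pyRange 0 6 1).flatMap fun k => (PySem.List.pyRange 0 6 1).map fun s =>
        [(PySem.List.pyGet? [0,1,2,3,4,5] j).getD 0, (PySem.List.pyGet? [0,1,2,3,4,5] i).getD 0,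
         (PySem.List.pyGet? [0,1,2,3,4,5] k).getD 0, (PySem.List.pyGet? [0,1,2,3,4,5] s).getD 0])
      = step6 (step6 (step6 (step6 [[]]))) from ?_]
  · exact dedup_eq_self _ nodup4
  · rw [hB]
    apply flatMap_congr'
    intro j hj
    rw [g_id j hj]
    apply flatMap_congr'
    intro i hi
    rw [g_id i hi]
    apply flatMap_congr'
    intro k hk
    rw [g_id k hk]
    exact List.map_congr_left (fun s hs => by rw [g_id s hs])

-- ===== VERDICT (by name: the statement is the Claim_ definition above) =====
theorem stringersamount_spec : Claim_equal_stringersamount := by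
  intro NS _
  unfold Spec_stringersamount
  by_cases h2 : NS = 2
  · subst h2; exact case2
  · by_cases h3 : NS = 3
    · subst h3; exact case3
    · by_cases h4 : NS = 4
      · subst h4; exact case4
      · simp [stringersamount, stringersamount_alt, h2, h3, h4, PySem.List.dedup,
          PySem.Set.ofList]
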